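-- pv_equiv track=rewrite | github.com/YanKe1816/fix-invalid-json-app | server.py | _balance_braces_brackets
-- ===== SOURCE A (Python) =====
-- MCP_ERROR_MESSAGE = "Input must be a valid JSON-like string"
--
-- class RepairError(Exception):
--     pass
--
-- def _balance_braces_brackets(text):
--     stack = []
--     openers = {"{": "}", "[": "]"}
--     closers = set(openers.values())
--     in_string = False
--     quote = ""
--     escape = False
--
--     for ch in text:
--         if in_string:
--             if escape:
--                 escape = False
--             elif ch == "\\":
--                 escape = True
--             elif ch == quote:
--                 in_string = False
--             continue
--
--         if ch in ('"', "'"):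
--             in_string = True
--             quote = ch
--             continue
--
--         if ch in openers:
--             stack.append(ch)
--         elif ch in closers:
--             if not stack:
--                 raise RepairError(MCP_ERROR_MESSAGE)
--             opener = stack.pop()
--             if openers[opener] != ch:
--                 raise RepairError(MCP_ERROR_MESSAGE)
--
--     while stack:
--         text += openers[stack.pop()]
--     return text
-- ===== SOURCE B (Python) =====
-- MCP_ERROR_MESSAGE = "Input must be a valid JSON-like string"
--
-- class RepairError(Exception):
--     pass
--
-- def _balance_braces_brackets(text):
--     # Phase 1: collect the structural characters (everything outside string literals)
--     # with an index-based scan; an inner loop skips string contents.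
--     struct = []
--     i = 0
--     n = len(text)
--     while i < n:
--         ch = text[i]
--         if ch in ('"', "'"):
--             i += 1
--             while i < n:
--                 c = text[i]
--                 if c == '\\':
--                     i += 2
--                 elif c == ch:
--                     i += 1
--                     break
--                 else:
--                     i += 1
--         else:
--             struct.append(ch)
--             i += 1
--     # Phase 2: match brackets over the structural characters only.
--     pairs = {'}': '{', ']': '['}
--     stack = []
--     for ch in struct:
--         if ch in ('{', '['):
--             stack.append(ch)
--         elif ch in ('}', ']'):
--             if not stack or stack.pop() != pairs[ch]:
--                 raise RepairError(MCP_ERROR_MESSAGE)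
--     # Phase 3: append the missing closers in one concatenation.
--     closing = {'{': '}', '[': ']'}
--     return text + ''.join(closing[c] for c in reversed(stack))
-- ===== Notes on version B (the rewrite author's own statement) =====
-- stated objective: alternative
-- what changed: A's single fused pass with in_string/quote/escape flags is replaced by a two-phase decomposition: an index-style scan with an inner string-skipping loop first extracts the structural characters, then a plain stack pass matches brackets over them and the missing closers are appended in one join.
import Mathlib
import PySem

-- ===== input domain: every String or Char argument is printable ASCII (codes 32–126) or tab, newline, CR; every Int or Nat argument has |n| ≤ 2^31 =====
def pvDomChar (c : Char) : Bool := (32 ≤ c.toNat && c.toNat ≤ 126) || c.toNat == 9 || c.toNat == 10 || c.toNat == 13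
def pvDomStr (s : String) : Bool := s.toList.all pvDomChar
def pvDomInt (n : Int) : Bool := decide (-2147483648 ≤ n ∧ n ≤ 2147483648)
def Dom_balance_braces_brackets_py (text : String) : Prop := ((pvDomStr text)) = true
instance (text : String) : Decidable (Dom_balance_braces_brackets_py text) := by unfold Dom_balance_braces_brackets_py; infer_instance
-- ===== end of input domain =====

-- B replaces A's fused one-pass flag-machine by a two-phase decomposition: first strip
-- string literals out, then bracket-match the structural characters only (objective: alternative).

-- ===== PORT A =====
-- state: (stack, in_string, quote, escape); none = RepairError was raised.
-- Python's `quote` starts as the empty string "" (never equal to any char while unread);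
-- we initialise it to '"' — it is only read after being set, so this is exact.
def pyAStep (st : Option (List Char × Bool × Char × Bool)) (ch : Char) :
    Option (List Char × Bool × Char × Bool) :=
  match st with
  | none => none
  | some (stack, instr, quote, escape) =>
    if instr then
      if escape then some (stack, true, quote, false)
      else if ch = '\\' then some (stack, true, quote, true)
      else if ch = quote then some (stack, false, quote, escape)
      else some (stack, instr, quote, escape)
    else if ch = '"' ∨ ch = '\'' then some (stack, true, ch, escape)
    else if ch = '{' ∨ ch = '[' then some (ch :: stack, false, quote, escape)
    else if ch = '}' ∨ ch = ']' then
      match stack with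
      | [] => none
      | op :: rest =>
        if (if op = '{' then '}' else ']') = ch then some (rest, false, quote, escape)
        else none
    else some (stack, instr, quote, escape)

-- openers[·]; the stack only ever holds '{' or '['
def closeOf (c : Char) : Char := if c = '{' then '}' else ']'

def balance_braces_brackets_py (text : String) : String :=
  match text.toList.foldl pyAStep (some ([], false, '"', false)) with
  | none => ""   -- unreachable under Pre_ (Python raises RepairError here)
  | some (stack, _, _, _) => text ++ String.ofList (stack.map closeOf)

-- ===== PORT B =====
-- inner while loop of phase 1: skip a string literal's contents, return the remainder
def altSkip (q : Char) : List Char → List Char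
  | [] => []
  | c :: rest =>
    if c = '\\' then
      match rest with
      | [] => []
      | _ :: r => altSkip q r
    else if c = q then rest
    else altSkip q rest

lemma altSkip_length_le (q : Char) (l : List Char) : (altSkip q l).length ≤ l.length := by
  fun_induction altSkip q l <;> simp_all <;> omega

-- phase 1: the structural characters (outside string literals)
def altStrip : List Char → List Char
  | [] => []
  | c :: rest =>
    if c = '"' ∨ c = '\'' then altStrip (altSkip c rest)
    else c :: altStrip rest
termination_by l => l.length
decreasing_by
  · exact Nat.lt_succ_of_le (altSkip_length_le _ _)
  · simp

-- phase 2 step; none = RepairError was raised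
def altMatch (st : Option (List Char)) (ch : Char) : Option (List Char) :=
  match st with
  | none => none
  | some stack =>
    if ch = '{' ∨ ch = '[' then some (ch :: stack)
    else if ch = '}' ∨ ch = ']' then
      match stack with
      | [] => none
      | op :: rest => if op = (if ch = '}' then '{' else '[') then some rest else none
    else some stack

-- closing[·] of Python B
def altCloseOf (c : Char) : Char := if c = '{' then '}' else ']'

def balance_braces_brackets_py_alt (text : String) : String :=
  match (altStrip text.toList).foldl altMatch (some []) with
  | none => ""   -- unreachable under Pre_ (Python raises RepairError here)
  | some stack => text ++ String.ofList (stack.map altCloseOf)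

-- ===== PRECONDITION & SPEC =====
-- Pre_ excludes exactly the inputs on which Python A raises RepairError
-- (an unmatched or mismatched closing brace/bracket outside a string literal).
-- Independent duplicates of the strip/match logic (may not reach the ports):
-- pvStruct strips string literals (mode = some (quote, escape) while inside one);
-- pvBal is the standard Dyck-prefix validity of the remaining brace/bracket sequence.
def pvStruct (mode : Option (Char × Bool)) : List Char → List Char
  | [] => []
  | c :: rest =>
    match mode with
    | some (q, esc) =>
        if esc then pvStruct (some (q, false)) rest
        else if c = '\\' then pvStruct (some (q, true)) rest
        else if c = q then pvStruct none rest
        else pvStruct (some (q, false)) rest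
    | none =>
        if c = '"' ∨ c = '\'' then pvStruct (some (c, false)) rest
        else c :: pvStruct none rest

def pvBal (stack : List Char) : List Char → Bool
  | [] => true
  | c :: rest =>
    if c = '{' ∨ c = '[' then pvBal (c :: stack) rest
    else if c = '}' then (match stack with | '{' :: s => pvBal s rest | _ => false)
    else if c = ']' then (match stack with | '[' :: s => pvBal s rest | _ => false)
    else pvBal stack rest

def Pre_balance_braces_brackets_py (text : String) : Prop :=
  pvBal [] (pvStruct none text.toList) = true
instance (text : String) : Decidable (Pre_balance_braces_brackets_py text) := by
  unfold Pre_balance_braces_brackets_py; infer_instance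

def pvWitness_balance_braces_brackets_py : String := "{\"a\": [1, 2"

def Spec_balance_braces_brackets_py (text : String) (out : String) : Prop :=
  out = balance_braces_brackets_py_alt text
instance (text : String) (out : String) : Decidable (Spec_balance_braces_brackets_py text out) := by
  unfold Spec_balance_braces_brackets_py; infer_instance

-- ===== CLAIM (what is proved, stated in full; the proofs are below) =====
def Claim_equal_balance_braces_brackets_py : Prop :=
  ∀ (text : String), Dom_balance_braces_brackets_py text →
    Pre_balance_braces_brackets_py text →
    Spec_balance_braces_brackets_py text (balance_braces_brackets_py text)

-- ===== LEMMAS AND PROOFS =====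

lemma foldl_pyAStep_none (l : List Char) : l.foldl pyAStep none = none := by
  induction l with
  | nil => rfl
  | cons c rest ih => simpa [pyAStep] using ih

lemma foldl_altMatch_none (l : List Char) : l.foldl altMatch none = none := by
  induction l with
  | nil => rfl
  | cons c rest ih => simpa [altMatch] using ih

-- skipping a string literal: the fused scan inside a string agrees (on the stack)
-- with restarting outside the string at the remainder altSkip computes
lemma scan_skip (q : Char) (rest : List Char) (st : List Char) :
    Option.map Prod.fst (rest.foldl pyAStep (some (st, true, q, false)))
      = Option.map Prod.fst ((altSkip q rest).foldl pyAStep (some (st, false, q, false))) := by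
  fun_induction altSkip q rest generalizing st with
  | case1 => simp
  | case2 => simp [pyAStep]
  | case3 d r ih => simpa [pyAStep] using ih st
  | case4 r hqc => simp [pyAStep, hqc]
  | case5 c r hc hcq ih => simpa [pyAStep, hc, hcq] using ih st

lemma scan_eq (l : List Char) (st : List Char) (q : Char) (hq : q ≠ '\\')
    (hst : ∀ c ∈ st, c = '{' ∨ c = '[') :
    Option.map Prod.fst (l.foldl pyAStep (some (st, false, q, false)))
      = (altStrip l).foldl altMatch (some st) := by
  fun_induction altStrip l generalizing st q with
  | case1 => simp
  | case2 c rest hc ih =>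
      have hcq : c ≠ '\\' := by rcases hc with h | h <;> subst h <;> decide
      have h1 : pyAStep (some (st, false, q, false)) c = some (st, true, c, false) := by
        simp [pyAStep, hc]
      rw [List.foldl_cons, h1, scan_skip c, ih st c hcq hst]
  | case3 c rest hc ih =>
      by_cases hop : c = '{' ∨ c = '['
      · have h1 : pyAStep (some (st, false, q, false)) c = some (c :: st, false, q, false) := by
          simp [pyAStep, hc, hop]
        have h2 : altMatch (some st) c = some (c :: st) := by simp [altMatch, hop]
        rw [List.foldl_cons, h1, List.foldl_cons, h2]
        exact ih (c :: st) q hq (by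
          intro x hx
          rcases List.mem_cons.mp hx with hx | hx
          · exact hx ▸ hop
          · exact hst x hx)
      · by_cases hcl : c = '}' ∨ c = ']'
        · match st, hst with
          | [], _ =>
            have h1 : pyAStep (some ([], false, q, false)) c = none := by
              simp [pyAStep, hc, hop, hcl]
            have h2 : altMatch (some []) c = none := by simp [altMatch, hop, hcl]
            rw [List.foldl_cons, h1, List.foldl_cons, h2,
              foldl_pyAStep_none, foldl_altMatch_none]
            rfl
          | op :: st', hst =>
            have hop2 : op = '{' ∨ op = '[' := hst op (by simp)
            by_cases hmat : (if op = '{' then '}' else ']') = c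
            · have hmat' : op = (if c = '}' then '{' else '[') := by
                rcases hop2 with h | h <;> subst h <;> simp_all <;>
                  rcases hcl with h | h <;> simp_all
              have h1 : pyAStep (some (op :: st', false, q, false)) c
                  = some (st', false, q, false) := by
                simp [pyAStep, hc, hop, hcl, hmat]
              have h2 : altMatch (some (op :: st')) c = some st' := by
                simp [altMatch, hop, hcl, ← hmat']
              rw [List.foldl_cons, h1, List.foldl_cons, h2]
              exact ih st' q hq (fun x hx => hst x (by simp [hx]))
            · have hmat' : ¬ op = (if c = '}' then '{' else '[') := by
                rcases hop2 with h | h <;> subst h <;> simp_all <;>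
                  rcases hcl with h | h <;> simp_all
              have h1 : pyAStep (some (op :: st', false, q, false)) c = none := by
                simp [pyAStep, hc, hop, hcl, hmat]
              have h2 : altMatch (some (op :: st')) c = none := by
                simp [altMatch, hop, hcl, hmat']
              rw [List.foldl_cons, h1, List.foldl_cons, h2,
                foldl_pyAStep_none, foldl_altMatch_none]
              rfl
        · have h1 : pyAStep (some (st, false, q, false)) c = some (st, false, q, false) := by
            simp [pyAStep, hc, hop, hcl]
          have h2 : altMatch (some st) c = some st := by simp [altMatch, hop, hcl]
          rw [List.foldl_cons, h1, List.foldl_cons, h2]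
          exact ih st q hq hst

-- ===== VERDICT (by name: the statement is the Claim_ definition above) =====
theorem balance_braces_brackets_py_spec : Claim_equal_balance_braces_brackets_py := by
  unfold Claim_equal_balance_braces_brackets_py
  intro text _ _
  unfold Spec_balance_braces_brackets_py balance_braces_brackets_py balance_braces_brackets_py_alt
  have h := scan_eq text.toList [] '"' (by decide) (by simp)
  rcases he : text.toList.foldl pyAStep (some ([], false, '"', false)) with _ | ⟨s, b, qq, e⟩ <;>
    rw [he] at h <;> simp at h <;> rw [← h] <;> rfl
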